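-- pv_equiv track=rewrite | github.com/nargesbh/Semantic-Tableaux | tableaux.py | negation_match
-- ===== SOURCE A (Python) =====
-- def negation_match(x):
--     numNeg=0
--     check=False
--     for i in range(len(x)):
--         if x[i]=="~" :
--             numNeg+=1
--             for j in range(i+1,len(x)):
--                 if(x[j]=="~"):
--                     numNeg+=1
--                     check=True
--                 else:
--                     if(numNeg%2 == 0):
--                         x = x[:i] + x[j:]
--                         numNeg=0
--                         break
--                     elif(numNeg%2 != 0):
--                         x = x[:i] + "~" + x[j:]
--                         numNeg=0
--                         break
--             if(check):
--                 break
--     if(check):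
--         return negation_match(x)
--     else:
--         return x
-- ===== SOURCE B (Python) =====
-- def negation_match(x):
--     out = []
--     run = 0
--     for ch in x:
--         if ch == "~":
--             run += 1
--         else:
--             if run % 2:
--                 out.append("~")
--             run = 0
--             out.append(ch)
--     if run % 2:
--         out.append("~")
--     return "".join(out)
-- ===== Notes on version B (the rewrite author's own statement) =====
-- stated objective: simpler
-- what changed: A repeatedly rescans the string with nested index loops, splices out one '~'-run per recursive call and recurses on the rewritten string; B makes a single left-to-right pass counting consecutive '~' and emits one '~' exactly when a run's length is odd.
import Mathlib
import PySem

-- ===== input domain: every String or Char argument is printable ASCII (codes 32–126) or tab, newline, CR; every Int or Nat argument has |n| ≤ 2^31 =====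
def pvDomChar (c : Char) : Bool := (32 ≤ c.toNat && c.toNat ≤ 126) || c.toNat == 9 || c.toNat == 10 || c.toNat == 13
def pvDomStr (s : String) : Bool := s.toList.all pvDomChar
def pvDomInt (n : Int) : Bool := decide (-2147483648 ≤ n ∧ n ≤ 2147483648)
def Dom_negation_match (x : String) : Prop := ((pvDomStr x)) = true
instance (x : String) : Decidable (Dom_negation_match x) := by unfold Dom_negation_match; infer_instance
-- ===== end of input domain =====

-- B replaces A's rescanning splice-and-recurse loop by one plain pass that emits '~' for each odd-length '~'-run (simpler; return value only).
-- Pre_ excludes exactly the strings ending in "~~", on which A recurses forever (RecursionError); B returns normally there.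

-- ===== PORT A =====
-- inner `for j` loop of A: scans the run of '~' from index j, counting them into numNeg,
-- and on the first non-'~' performs the rewrite and breaks (returns numNeg = 0).
-- Returns (x', numNeg, check); falling off the end returns x unchanged.
def pvInnerA (x : List Char) (i j numNeg : Nat) (check : Bool) : List Char × Nat × Bool :=
  if h : j < x.length then
    if x[j] = '~' then pvInnerA x i (j+1) (numNeg+1) true
    else if numNeg % 2 = 0 then (x.take i ++ x.drop j, 0, check)
    else (x.take i ++ '~' :: x.drop j, 0, check)
  else (x, numNeg, check)
termination_by x.length - j

-- outer `for i` loop; `len` is Python's frozen range bound len(x).  x.getD i ' ' ports x[i]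
-- (whenever this line is reached, i < x.length, so the default is never read).
def pvOuterA (x : List Char) (i len numNeg : Nat) (check : Bool) : List Char × Bool :=
  if i < len then
    if x.getD i ' ' = '~' then
      match pvInnerA x i (i+1) (numNeg+1) check with
      | (x', n', c') => if c' then (x', true) else pvOuterA x' (i+1) len n' c'
    else pvOuterA x (i+1) len numNeg check
  else (x, check)
termination_by len - i

-- the recursive top level `return negation_match(x)`; fuel bounds the recursion depth
-- (inside Pre_ each round shortens x, so length+1 rounds always suffice; outside Pre_ A recurses forever).
def pvNegA : Nat → List Char → List Char
  | 0, x => x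
  | fuel+1, x =>
    match pvOuterA x 0 x.length 0 false with
    | (x', check) => if check then pvNegA fuel x' else x'

def negation_match (x : String) : String := String.ofList (pvNegA (x.toList.length + 1) x.toList)

-- ===== PORT B =====
-- Source B's single loop: `run` counts the current '~'-run, `acc` is the out list.
def pvAltLoop : List Char → Nat → List Char → List Char
  | [], run, acc => acc ++ (if run % 2 = 1 then ['~'] else [])
  | c :: rest, run, acc =>
    if c = '~' then pvAltLoop rest (run+1) acc
    else pvAltLoop rest 0 (acc ++ (if run % 2 = 1 then ['~'] else []) ++ [c])

def negation_match_alt (x : String) : String := String.ofList (pvAltLoop x.toList 0 [])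

-- ===== PRECONDITION & SPEC =====
-- Pre_ excludes exactly the strings ending in "~~": there A's recursion never terminates (Python raises
-- RecursionError), while B returns the string with every '~'-run collapsed by parity.
def Pre_negation_match (x : String) : Prop := ¬ (['~', '~'] <:+ x.toList)
instance (x : String) : Decidable (Pre_negation_match x) := by unfold Pre_negation_match; infer_instance

def pvWitness_negation_match : String := "~~a~b"

def Spec_negation_match (x : String) (out : String) : Prop := out = negation_match_alt x
instance (x : String) (out : String) : Decidable (Spec_negation_match x out) := by unfold Spec_negation_match; infer_instance

-- ===== CLAIM (what is proved, stated in full; the proofs are below) =====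
def Claim_equal_negation_match : Prop := ∀ (x : String), Dom_negation_match x → Pre_negation_match x → Spec_negation_match x (negation_match x)

-- ===== LEMMAS AND PROOFS =====

-- canonical form: every maximal '~'-run collapsed by parity (= repeated removal of adjacent "~~")
def pvCanon : List Char → List Char
  | [] => []
  | [c] => [c]
  | a :: b :: t => if a = '~' ∧ b = '~' then pvCanon t else a :: pvCanon (b :: t)

def pvNoDouble : List Char → Bool
  | a :: b :: t => if a = '~' ∧ b = '~' then false else pvNoDouble (b :: t)
  | _ => true

lemma pvCanon_cons_ne (c : Char) (w : List Char) (hc : c ≠ '~') :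
    pvCanon (c :: w) = c :: pvCanon w := by
  cases w with
  | nil => simp [pvCanon]
  | cons d w' => simp [pvCanon, hc]

lemma pvCanon_mid (u : List Char) (c : Char) (w : List Char) (hc : c ≠ '~') :
    pvCanon (u ++ c :: w) = pvCanon u ++ c :: pvCanon w := by
  induction u using pvCanon.induct with
  | case1 => simp [pvCanon_cons_ne c w hc, pvCanon]
  | case2 a =>
    by_cases ha : a = '~'
    · subst ha
      rw [List.cons_append, List.nil_append, pvCanon]
      simp [hc, pvCanon_cons_ne c w hc, pvCanon]
    · rw [List.cons_append, List.nil_append, pvCanon_cons_ne a _ ha,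
        pvCanon_cons_ne c w hc, pvCanon_cons_ne a _ ha]
      simp [pvCanon]
  | case3 a b t hab ih =>
    obtain ⟨ha, hb⟩ := hab
    subst ha; subst hb
    rw [List.cons_append, List.cons_append]
    rw [show pvCanon ('~' :: '~' :: (t ++ c :: w)) = pvCanon (t ++ c :: w) by simp [pvCanon]]
    rw [show pvCanon ('~' :: '~' :: t) = pvCanon t by simp [pvCanon]]
    exact ih
  | case4 a b t hab ih =>
    rw [List.cons_append, List.cons_append]
    rw [show pvCanon (a :: b :: (t ++ c :: w)) = a :: pvCanon (b :: (t ++ c :: w)) by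
      simp [pvCanon, hab]]
    rw [show pvCanon (a :: b :: t) = a :: pvCanon (b :: t) by simp [pvCanon, hab]]
    rw [← List.cons_append, ih]
    simp

lemma pvCanon_snoc2 (w : List Char) : pvCanon (w ++ ['~', '~']) = pvCanon w := by
  induction w using pvCanon.induct with
  | case1 => simp [pvCanon]
  | case2 c =>
    by_cases hc : c = '~'
    · subst hc; simp [pvCanon]
    · simp [pvCanon, hc]
  | case3 a b t hab ih =>
    obtain ⟨ha, hb⟩ := hab; subst ha; subst hb
    simpa [pvCanon] using ih
  | case4 a b t hab ih =>
    rw [List.cons_append, List.cons_append]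
    rw [show pvCanon (a :: b :: (t ++ ['~','~'])) = a :: pvCanon (b :: (t ++ ['~','~'])) by
      simp [pvCanon, hab]]
    rw [show pvCanon (a :: b :: t) = a :: pvCanon (b :: t) by simp [pvCanon, hab]]
    rw [← List.cons_append, ih]

lemma pvCanon_rep_parity (u : List Char) (m : Nat) :
    pvCanon (u ++ List.replicate m '~') = pvCanon (u ++ List.replicate (m % 2) '~') := by
  induction m using Nat.strong_induction_on with
  | _ m ih =>
    match m, ih with
    | 0, _ => rfl
    | 1, _ => rfl
    | (m+2), ih =>
      have h : List.replicate (m+2) '~' = List.replicate m '~' ++ ['~','~'] := by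
        rw [← List.replicate_append_replicate]
        rfl
      rw [h, ← List.append_assoc, pvCanon_snoc2, ih m (by omega),
        show (m+2) % 2 = m % 2 from by omega]

lemma pvCanon_replicate (m : Nat) :
    pvCanon (List.replicate m '~') = (if m % 2 = 1 then ['~'] else []) := by
  have := pvCanon_rep_parity [] m
  simp only [List.nil_append] at this
  rw [this]
  rcases Nat.mod_two_eq_zero_or_one m with h | h <;> simp [h, pvCanon]

lemma pvCanon_eq_self (w : List Char) (h : pvNoDouble w = true) : pvCanon w = w := by
  induction w using pvCanon.induct with
  | case1 => rfl
  | case2 c => rfl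
  | case3 a b t hab ih => simp [pvNoDouble, hab] at h
  | case4 a b t hab ih =>
    have h' : pvNoDouble (b :: t) = true := by simpa [pvNoDouble, hab] using h
    simp [pvCanon, hab, ih h']

-- ===== B-side characterisation =====
lemma pvAltLoop_eq (cs : List Char) : ∀ (run : Nat) (acc : List Char),
    pvAltLoop cs run acc = acc ++ pvCanon (List.replicate run '~' ++ cs) := by
  induction cs with
  | nil =>
    intro run acc
    simp [pvAltLoop, pvCanon_replicate]
  | cons c rest ih =>
    intro run acc
    by_cases hc : c = '~'
    · subst hc
      rw [pvAltLoop, if_pos rfl, ih]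
      congr 2
      rw [List.replicate_succ' ]
      simp
    · rw [pvAltLoop, if_neg hc, ih]
      rw [pvCanon_mid (List.replicate run '~') c rest hc, pvCanon_replicate]
      simp

lemma pvAlt_canon (x : String) : negation_match_alt x = String.ofList (pvCanon x.toList) := by
  rw [negation_match_alt, pvAltLoop_eq]
  simp

-- ===== A-side characterisation =====

-- the inner loop on a run that ends before the end of the string
lemma pvInnerA_run (x : List Char) (i : Nat) : ∀ (m j n : Nat) (check : Bool) (c : Char) (v : List Char),
    x.drop j = List.replicate m '~' ++ c :: v → c ≠ '~' →
    pvInnerA x i j n check =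
      (x.take i ++ (if (n + m) % 2 = 0 then [] else ['~']) ++ c :: v, 0, check || decide (0 < m)) := by
  intro m
  induction m with
  | zero =>
    intro j n check c v hd hc
    simp only [List.replicate, List.nil_append] at hd
    have hj : j < x.length := by
      by_contra h
      rw [List.drop_eq_nil_of_le (by omega)] at hd
      exact absurd hd (by simp)
    have hxj : x[j] = c := by
      have : (x.drop j)[0]? = x[j]? := by simp
      rw [hd] at this
      simp at this
      rw [List.getElem?_eq_getElem hj] at this
      exact (Option.some_injective _ this.symm)
    rw [pvInnerA, dif_pos hj, if_neg (by rw [hxj]; exact hc)]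
    rcases Nat.mod_two_eq_zero_or_one n with h | h <;> simp [h, hd]
  | succ m ih =>
    intro j n check c v hd hc
    have hd0 : x.drop j = '~' :: (List.replicate m '~' ++ c :: v) := by
      rw [hd, List.replicate_succ]; rfl
    have hj : j < x.length := by
      by_contra h
      rw [List.drop_eq_nil_of_le (by omega)] at hd0
      exact absurd hd0 (by simp)
    have hxj : x[j] = '~' := by
      have : (x.drop j)[0]? = x[j]? := by simp
      rw [hd0] at this
      simp at this
      rw [List.getElem?_eq_getElem hj] at this
      exact (Option.some_injective _ this.symm)
    have hd1 : x.drop (j+1) = List.replicate m '~' ++ c :: v := by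
      have : x.drop (j+1) = (x.drop j).tail := by rw [List.tail_drop]
      rw [this, hd0]; rfl
    rw [pvInnerA, dif_pos hj, if_pos hxj, ih (j+1) (n+1) true c v hd1 hc]
    have : n + 1 + m = n + (m + 1) := by omega
    simp [this]

-- the inner loop on a run that reaches the end of the string
lemma pvInnerA_end (x : List Char) (i : Nat) : ∀ (m j n : Nat) (check : Bool),
    x.drop j = List.replicate m '~' →
    pvInnerA x i j n check = (x, n + m, check || decide (0 < m)) := by
  intro m
  induction m with
  | zero =>
    intro j n check hd
    simp only [List.replicate] at hd
    have hj : ¬ j < x.length := by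
      by_contra h
      have := List.length_drop (l := x) (i := j)
      rw [hd] at this
      simp at this
      omega
    rw [pvInnerA, dif_neg hj]
    simp
  | succ m ih =>
    intro j n check hd
    have hd0 : x.drop j = '~' :: List.replicate m '~' := by
      rw [hd, List.replicate_succ]
    have hj : j < x.length := by
      by_contra h
      rw [List.drop_eq_nil_of_le (by omega)] at hd0
      exact absurd hd0 (by simp)
    have hxj : x[j] = '~' := by
      have : (x.drop j)[0]? = x[j]? := by simp
      rw [hd0] at this
      simp at this
      rw [List.getElem?_eq_getElem hj] at this
      exact (Option.some_injective _ this.symm)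
    have hd1 : x.drop (j+1) = List.replicate m '~' := by
      have : x.drop (j+1) = (x.drop j).tail := by rw [List.tail_drop]
      rw [this, hd0]; rfl
    rw [pvInnerA, dif_pos hj, if_pos hxj, ih (j+1) (n+1) true hd1]
    have : n + 1 + m = n + (m + 1) := by omega
    simp [this]

lemma pvDrop_head (x : List Char) (i : Nat) (c : Char) (r : List Char)
    (h : x.drop i = c :: r) : i < x.length ∧ x.getD i ' ' = c ∧ x.drop (i+1) = r := by
  have hi : i < x.length := by
    by_contra hh
    rw [List.drop_eq_nil_of_le (by omega)] at h
    exact absurd h (by simp)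
  have hxe : x[i]? = some c := by
    have h0 : (x.drop i)[0]? = x[i]? := by simp
    rw [h] at h0
    simpa using h0.symm
  refine ⟨hi, ?_, ?_⟩
  · simp [List.getD, hxe]
  · have : x.drop (i+1) = (x.drop i).tail := by rw [List.tail_drop]
    rw [this, h]; rfl

lemma pvTake_cons_drop (x : List Char) (i : Nat) (hi : i < x.length) (h : x.getD i ' ' = '~') :
    x.take i ++ '~' :: x.drop (i+1) = x := by
  have h' : x[i] = '~' := by
    have := List.getD_eq_getElem x ' ' hi
    rw [h] at this
    exact this.symm
  rw [← h', List.getElem_cons_drop, List.take_append_drop]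

-- the outer loop finds no adjacent "~~": x is returned unchanged, check stays false
lemma pvOuterA_noDouble (x : List Char) : ∀ (i : Nat),
    pvNoDouble (x.drop i) = true →
    pvOuterA x i x.length 0 false = (x, false) := by
  have H : ∀ (k i : Nat), x.length - i ≤ k → pvNoDouble (x.drop i) = true →
      pvOuterA x i x.length 0 false = (x, false) := by
    intro k
    induction k with
    | zero =>
      intro i hk hnd
      rw [pvOuterA, if_neg (by omega)]
    | succ k ih =>
      intro i hk hnd
      by_cases hi : i < x.length
      · cases hd : x.drop i with
        | nil =>
          have := List.length_drop (l := x) (i := i)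
          rw [hd] at this; simp at this; omega
        | cons c r =>
          obtain ⟨hi', hgd, hd1⟩ := pvDrop_head x i c r hd
          by_cases hc : c = '~'
          · subst hc
            rw [pvOuterA, if_pos hi, if_pos hgd]
            cases hr : r with
            | nil =>
              rw [pvInnerA_end x i 0 (i+1) 1 false (by rw [hd1, hr]; rfl)]
              simp only [Nat.lt_irrefl, decide_false, Bool.or_false, if_neg Bool.false_ne_true]
              rw [pvOuterA, if_neg (by
                have := List.length_drop (l := x) (i := i)
                rw [hd, hr] at this; simp at this; omega)]
            | cons d r' =>
              have hdne : d ≠ '~' := by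
                intro hdd
                rw [hd, hr, hdd] at hnd
                simp [pvNoDouble] at hnd
              rw [pvInnerA_run x i 0 (i+1) 1 false d r' (by rw [hd1, hr]; rfl) hdne]
              simp only [Nat.add_zero, Nat.lt_irrefl, decide_false, Bool.or_false,
                if_neg Bool.false_ne_true]
              have hx' : x.take i ++ (if 1 % 2 = 0 then [] else ['~']) ++ d :: r' = x := by
                rw [show (if 1 % 2 = 0 then ([] : List Char) else ['~']) = ['~'] by rfl]
                have : x.drop (i+1) = d :: r' := by rw [hd1, hr]
                rw [List.append_assoc, List.singleton_append, ← this,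
                  pvTake_cons_drop x i hi' hgd]
              rw [hx']
              apply ih (i+1) (by omega)
              rw [hd1, hr]
              have : pvNoDouble ('~' :: d :: r') = pvNoDouble (d :: r') := by
                simp [pvNoDouble, hdne]
              rw [hd, hr] at hnd
              rw [← this]
              exact hnd
          · rw [pvOuterA, if_pos hi, if_neg (by rw [hgd]; exact hc)]
            apply ih (i+1) (by omega)
            rw [hd1]
            cases hr : r with
            | nil => rfl
            | cons d r' =>
              rw [hd, hr] at hnd
              have : pvNoDouble (c :: d :: r') = pvNoDouble (d :: r') := by
                simp [pvNoDouble, hc]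
              rw [this] at hnd
              exact hnd
      · rw [pvOuterA, if_neg hi]
  intro i
  exact H (x.length - i) i (le_refl _)

-- the outer loop meets an adjacent "~~": the first long run (length m ≥ 2, necessarily followed
-- by a non-'~' since x does not end in "~~") is collapsed by parity and check is set
lemma pvOuterA_double (x : List Char) (hpre : ¬ (['~','~'] <:+ x)) : ∀ (i : Nat),
    (i = 0 ∨ x.getD (i-1) ' ' ≠ '~' ∨ ¬ (i < x.length ∧ x.getD i ' ' = '~')) →
    pvNoDouble (x.drop i) = false →
    ∃ (p m : Nat) (c : Char) (v : List Char),
      x.drop p = List.replicate m '~' ++ c :: v ∧ c ≠ '~' ∧ 2 ≤ m ∧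
      pvOuterA x i x.length 0 false =
        (x.take p ++ (if m % 2 = 0 then [] else ['~']) ++ c :: v, true) := by
  have H : ∀ (k i : Nat), x.length - i ≤ k →
      (i = 0 ∨ x.getD (i-1) ' ' ≠ '~' ∨ ¬ (i < x.length ∧ x.getD i ' ' = '~')) →
      pvNoDouble (x.drop i) = false →
      ∃ (p m : Nat) (c : Char) (v : List Char),
        x.drop p = List.replicate m '~' ++ c :: v ∧ c ≠ '~' ∧ 2 ≤ m ∧
        pvOuterA x i x.length 0 false =
          (x.take p ++ (if m % 2 = 0 then [] else ['~']) ++ c :: v, true) := by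
    intro k
    induction k with
    | zero =>
      intro i hk hb hnd
      exfalso
      rw [List.drop_eq_nil_of_le (by omega)] at hnd
      simp [pvNoDouble] at hnd
    | succ k ih =>
      intro i hk hb hnd
      have hi : i < x.length := by
        by_contra hh
        rw [List.drop_eq_nil_of_le (by omega)] at hnd
        simp [pvNoDouble] at hnd
      cases hd : x.drop i with
      | nil =>
        rw [hd] at hnd; simp [pvNoDouble] at hnd
      | cons c r =>
        obtain ⟨hi', hgd, hd1⟩ := pvDrop_head x i c r hd
        by_cases hc : c = '~'
        · subst hc
          -- the run of '~' starting at i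
          set t := r.takeWhile (fun d => d = '~') with ht
          set rest := r.dropWhile (fun d => d = '~') with hrest
          have hr_split : r = t ++ rest := (List.takeWhile_append_dropWhile).symm
          have ht_rep : t = List.replicate t.length '~' := by
            apply List.eq_replicate_of_mem
            intro d hdm
            have := List.mem_takeWhile_imp (ht ▸ hdm)
            simpa using this
          cases hrest_c : rest with
          | nil =>
            -- run reaches the end of x: contradicts hpre (run length ≥ 2 since double at i)
            exfalso
            have hr_rep : r = List.replicate t.length '~' := by
              rw [hr_split, hrest_c, List.append_nil]
              exact ht_rep
            have hlen : 1 ≤ t.length := by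
              cases htl : t.length with
              | zero =>
                rw [htl] at hr_rep
                simp at hr_rep
                rw [hd, hr_rep] at hnd
                simp [pvNoDouble] at hnd
              | succ n => omega
            have hdrop : x.drop i = List.replicate (t.length + 1) '~' := by
              rw [hd, hr_rep, List.replicate_succ]
            have hsuf : List.replicate (t.length + 1) '~' <:+ x := hdrop ▸ List.drop_suffix i x
            apply hpre
            have h2 : (['~','~'] : List Char) <:+ List.replicate (t.length + 1) '~' := by
              refine ⟨List.replicate (t.length - 1) '~', ?_⟩
              rw [show (['~','~'] : List Char) = List.replicate 2 '~' by rfl,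
                List.replicate_append_replicate]
              congr 1
              omega
            exact h2.trans hsuf
          | cons e v =>
            have he : e ≠ '~' := by
              have := List.head?_dropWhile_not (p := fun d => decide (d = '~')) (l := r)
              rw [← hrest, hrest_c] at this
              simpa using this
            have hre : r = List.replicate t.length '~' ++ e :: v := by
              conv_lhs => rw [hr_split, hrest_c, ht_rep]
            -- inner loop consumes the whole run
            have hdrop1 : x.drop (i+1) = List.replicate t.length '~' ++ e :: v := by
              rw [hd1, hre]
            rw [pvOuterA, if_pos hi, if_pos hgd,
              pvInnerA_run x i t.length (i+1) 1 false e v hdrop1 he]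
            cases htl : t.length with
            | zero =>
              -- single '~' at i: the rewrite is the identity, continue scanning
              rw [htl] at hdrop1
              simp only [List.replicate, List.nil_append] at hdrop1
              simp only [Nat.add_zero, Nat.lt_irrefl, decide_false, Bool.or_false,
                if_neg Bool.false_ne_true]
              have hx' : x.take i ++ (if 1 % 2 = 0 then [] else ['~']) ++ e :: v = x := by
                rw [show (if 1 % 2 = 0 then ([] : List Char) else ['~']) = ['~'] by rfl]
                rw [List.append_assoc, List.singleton_append, ← hdrop1,
                  pvTake_cons_drop x i hi' hgd]
              rw [hx']
              apply ih (i+1) (by omega)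
              · right; right
                rintro ⟨_, hgg⟩
                obtain ⟨_, hge, _⟩ := pvDrop_head x (i+1) e v hdrop1
                rw [hge] at hgg
                exact he hgg
              · rw [hdrop1]
                rw [hd, hre, htl] at hnd
                simp only [List.replicate, List.nil_append] at hnd
                have : pvNoDouble ('~' :: e :: v) = pvNoDouble (e :: v) := by
                  simp [pvNoDouble, he]
                rw [this] at hnd
                exact hnd
            | succ n =>
              -- run of length n+2 ≥ 2: collapse and stop with check = true
              refine ⟨i, n + 2, e, v, ?_, he, by omega, ?_⟩
              · rw [hd, hre, htl]
                rfl
              · have h12 : 1 + (n + 1) = n + 2 := by omega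
                simp [h12]
        · rw [pvOuterA, if_pos hi, if_neg (by rw [hgd]; exact hc)]
          have hnd1 : pvNoDouble (x.drop (i+1)) = false := by
            rw [hd1]
            cases hr : r with
            | nil =>
              rw [hd, hr] at hnd
              simp [pvNoDouble] at hnd
            | cons d r' =>
              rw [hd, hr] at hnd
              have : pvNoDouble (c :: d :: r') = pvNoDouble (d :: r') := by
                simp [pvNoDouble, hc]
              rw [this] at hnd
              exact hnd
          obtain ⟨p, m, c', v, h1, h2, h3, h4⟩ := ih (i+1) (by omega)
            (by
              right; left
              simp only [Nat.add_sub_cancel]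
              rw [hgd]
              exact hc) hnd1
          exact ⟨p, m, c', v, h1, h2, h3, h4⟩
  intro i hb hnd
  exact H (x.length - i) i (le_refl _) hb hnd

-- a suffix no longer than the right part of an append is a suffix of that right part
lemma pvSuffix_right {α : Type} (s u w : List α) (h : s <:+ u ++ w)
    (hlen : s.length ≤ w.length) : s <:+ w := by
  obtain ⟨z, hz⟩ := h
  have hl : u.length ≤ z.length := by
    have := congrArg List.length hz
    simp at this
    omega
  refine ⟨z.drop u.length, ?_⟩
  have h1 : (z ++ s).drop u.length = z.drop u.length ++ s :=
    List.drop_append_of_le_length hl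
  rw [hz, List.drop_left] at h1
  exact h1.symm

-- one full round of A: on a string with no "~~" it stops; otherwise it collapses the first long
-- run, preserving pvCanon, the precondition, and strictly shrinking the string
lemma pvNegA_eq : ∀ (fuel : Nat) (x : List Char), x.length < fuel →
    ¬ (['~','~'] <:+ x) → pvNegA fuel x = pvCanon x := by
  intro fuel
  induction fuel with
  | zero => intro x h; omega
  | succ fuel ih =>
    intro x hlen hpre
    cases hnd : pvNoDouble x with
    | true =>
      rw [pvNegA, pvOuterA_noDouble x 0 (by simpa using hnd)]
      simp [pvCanon_eq_self x hnd]
    | false =>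
      obtain ⟨p, m, c, v, h1, h2, h3, h4⟩ :=
        pvOuterA_double x hpre 0 (Or.inl rfl) (by simpa using hnd)
      rw [pvNegA, h4]
      show pvNegA fuel ((List.take p x ++ if m % 2 = 0 then [] else ['~']) ++ c :: v) = pvCanon x
      set pad : List Char := if m % 2 = 0 then [] else ['~'] with hpad
      have hpad_rep : pad = List.replicate (m % 2) '~' := by
        rcases Nat.mod_two_eq_zero_or_one m with h | h <;> simp [hpad, h]
      have hx_split : x = x.take p ++ (List.replicate m '~' ++ c :: v) := by
        conv_lhs => rw [← List.take_append_drop p x]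
        rw [h1]
      have hcv_suffix : c :: v <:+ x := by
        have : x.drop (p + m) = c :: v := by
          have hdd : x.drop (p + m) = (x.drop p).drop m := by
            rw [List.drop_drop]
          rw [hdd, h1, List.drop_append_of_le_length (by simp), List.drop_replicate]
          simp
        exact this ▸ List.drop_suffix (p + m) x
      -- pvCanon is preserved by the rewrite
      have hcanon : pvCanon (x.take p ++ pad ++ c :: v) = pvCanon x := by
        rw [pvCanon_mid _ c v h2, hpad_rep,
          ← pvCanon_rep_parity (x.take p) m]
        conv_rhs => rw [hx_split, ← List.append_assoc, pvCanon_mid _ c v h2]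
      -- the new string is strictly shorter
      have hshort : (x.take p ++ pad ++ c :: v).length < x.length := by
        conv_rhs => rw [hx_split]
        have hples : pad.length ≤ 1 := by
          rcases Nat.mod_two_eq_zero_or_one m with h | h <;> simp [hpad, h]
        simp only [List.length_append, List.length_cons, List.length_replicate]
        omega
      -- the new string still does not end in "~~"
      have hpre' : ¬ (['~','~'] <:+ x.take p ++ pad ++ c :: v) := by
        intro hsuf
        cases v with
        | nil =>
          -- x' ends with c ≠ '~'
          obtain ⟨z, hz⟩ := hsuf
          have hg1 : (z ++ ['~', '~']).getLast? = some '~' := by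
            rw [show z ++ ['~','~'] = (z ++ ['~']) ++ ['~'] by simp, List.getLast?_concat]
          have hg2 : (x.take p ++ pad ++ [c]).getLast? = some c := List.getLast?_concat
          rw [hz, hg2] at hg1
          exact h2 (Option.some_injective _ hg1)
        | cons d v' =>
          -- the "~~" lies inside c :: d :: v', a suffix of x
          have hs2 : (['~','~'] : List Char) <:+ c :: d :: v' :=
            pvSuffix_right _ _ _ hsuf (by simp)
          exact hpre (hs2.trans hcv_suffix)
      rw [ih _ (by omega) hpre', hcanon]

-- ===== VERDICT (by name: the statement is the Claim_ definition above) =====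
theorem negation_match_spec : Claim_equal_negation_match := by
  intro x _ hpre
  unfold Spec_negation_match
  rw [pvAlt_canon, negation_match,
    pvNegA_eq (x.toList.length + 1) x.toList (by omega) hpre]
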